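-- pv_equiv track=rewrite | github.com/ihgazni2/string-painter | spaint/spaint.py | get_sis_from_eis
-- ===== SOURCE A (Python) =====
-- def get_sis_from_eis(eis,lngth):
--     eis.sort()
--     if(eis[-1]>lngth):
--         eis[-1] = lngth
--     else:
--         pass
--     sis = [0]
--     for i in range(0,eis.__len__()):
--         si = eis[i] + 1
--         if(si<lngth):
--             sis.append(si)
--         else:
--             break
--     return(sis)
-- ===== SOURCE B (Python) =====
-- def get_sis_from_eis(eis, lngth):
--     eis.sort()
--     if eis[-1] > lngth:
--         eis[-1] = lngth
--     # after the sort, the elements with e + 1 < lngth form a prefix: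
--     # binary-search for the cutoff instead of scanning linearly
--     lo, hi = 0, len(eis)
--     while lo < hi:
--         mid = (lo + hi) // 2
--         if eis[mid] < lngth - 1:
--             lo = mid + 1
--         else:
--             hi = mid
--     return [0] + [e + 1 for e in eis[:lo]]
-- ===== Notes on version B (the rewrite author's own statement) =====
-- stated objective: alternative
-- what changed: The linear early-break scan over the sorted list is replaced by a hand-written binary search for the cutoff index of elements with e+1 < lngth, followed by one slice-and-map; the sort and clamp (and their in-place mutation of eis) are kept.
import Mathlib
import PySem

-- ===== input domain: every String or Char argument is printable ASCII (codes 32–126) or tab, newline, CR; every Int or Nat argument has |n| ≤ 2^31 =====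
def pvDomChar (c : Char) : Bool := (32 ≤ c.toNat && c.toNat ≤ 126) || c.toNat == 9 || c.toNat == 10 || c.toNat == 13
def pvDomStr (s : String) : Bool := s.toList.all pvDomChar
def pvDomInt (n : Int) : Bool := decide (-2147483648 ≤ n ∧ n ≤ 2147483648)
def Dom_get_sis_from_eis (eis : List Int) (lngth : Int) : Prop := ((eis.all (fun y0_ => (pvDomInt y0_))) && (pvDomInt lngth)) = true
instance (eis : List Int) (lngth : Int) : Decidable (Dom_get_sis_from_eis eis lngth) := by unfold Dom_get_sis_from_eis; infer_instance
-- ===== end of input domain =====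

-- B replaces A's linear early-break scan of the sorted list by a binary search for the
-- cutoff index, then emits the prefix in one slice-and-map (objective: alternative).
-- Both Pythons mutate the argument identically (in-place sort + clamp of the last
-- element); the equivalence proved here is about the RETURN value.

-- ===== PORT A =====
-- shared by both ports: both Pythons run the identical 'eis.sort(); if eis[-1] > lngth: eis[-1] = lngth'
-- (eis[-1] read via pyGet?; the 'none' branch is unreachable under Pre_, where eis ≠ [])
def pvSortClamp (eis : List Int) (lngth : Int) : List Int :=
  let s := PySem.List.sorted eis (fun x => x) false
  match PySem.List.pyGet? s (-1) with
  | some last => if last > lngth then s.dropLast ++ [lngth] else s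
  | none => s

-- the 'for i in range(0, len(eis)): si = eis[i] + 1; if si < lngth: sis.append(si) else: break' loop
def pvLoopA (lngth : Int) (s : List Int) (sis : List Int) : List Int :=
  match s with
  | [] => sis
  | e :: rest => if e + 1 < lngth then pvLoopA lngth rest (sis ++ [e + 1]) else sis

def get_sis_from_eis (eis : List Int) (lngth : Int) : List Int :=
  pvLoopA lngth (pvSortClamp eis lngth) [0]

-- ===== PORT B =====
-- the hand-written 'while lo < hi' binary search of Source B; eis[mid] with 0 ≤ lo ≤ mid < hi ≤ len
-- is always in range, so getD is exact there
-- the fuel argument (first Nat) only makes the recursion structural: hi - lo shrinks at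
-- every step, so any fuel ≥ hi - lo (we pass s.length) runs the loop to completion
def pvBsearch (s : List Int) (t : Int) : Nat → Nat → Nat → Nat
  | 0, lo, _hi => lo
  | fuel + 1, lo, hi =>
    if lo < hi then
      let mid := (lo + hi) / 2
      if s.getD mid 0 < t then pvBsearch s t fuel (mid + 1) hi else pvBsearch s t fuel lo mid
    else lo

def get_sis_from_eis_alt (eis : List Int) (lngth : Int) : List Int :=
  0 :: (PySem.List.slice (pvSortClamp eis lngth) none
        (some ((pvBsearch (pvSortClamp eis lngth) (lngth - 1) (pvSortClamp eis lngth).length 0 (pvSortClamp eis lngth).length : Nat) : Int))).map (· + 1)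

-- ===== PRECONDITION & SPEC =====
-- Pre_ excludes only eis = [], on which the Python A raises IndexError at eis[-1] (as does B).
def Pre_get_sis_from_eis (eis : List Int) (lngth : Int) : Prop := eis ≠ []
instance (eis : List Int) (lngth : Int) : Decidable (Pre_get_sis_from_eis eis lngth) := by unfold Pre_get_sis_from_eis; infer_instance
def pvWitness_get_sis_from_eis : List Int × Int := ([2, 5], 4)

def Spec_get_sis_from_eis (eis : List Int) (lngth : Int) (out : List Int) : Prop := out = get_sis_from_eis_alt eis lngth
instance (eis : List Int) (lngth : Int) (out : List Int) : Decidable (Spec_get_sis_from_eis eis lngth out) := by unfold Spec_get_sis_from_eis; infer_instance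

-- ===== CLAIM (what is proved, stated in full; the proofs are below) =====
def Claim_equal_get_sis_from_eis : Prop := ∀ (eis : List Int) (lngth : Int), Dom_get_sis_from_eis eis lngth → Pre_get_sis_from_eis eis lngth → Spec_get_sis_from_eis eis lngth (get_sis_from_eis eis lngth)

-- ===== LEMMAS AND PROOFS =====

-- A's loop accumulates (as +1-shifted images) exactly the takeWhile prefix
lemma pvLoopA_eq (lngth : Int) (s acc : List Int) :
    pvLoopA lngth s acc = acc ++ (s.takeWhile (fun e => decide (e + 1 < lngth))).map (· + 1) := by
  induction s generalizing acc with
  | nil => simp [pvLoopA]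
  | cons e rest ih =>
    by_cases h : e + 1 < lngth
    · simp [pvLoopA, h, ih]
    · simp [pvLoopA, h]

-- monotone-prefix property of the sorted-then-clamped list: if the element at j is
-- below the cutoff, so is every earlier one
lemma pvSortClamp_mono (eis : List Int) (lngth t : Int) (ht : t ≤ lngth) :
    ∀ i j : Nat, i ≤ j → j < (pvSortClamp eis lngth).length →
      (pvSortClamp eis lngth).getD j 0 < t → (pvSortClamp eis lngth).getD i 0 < t := by
  have hpw : (PySem.List.sorted eis (fun x => x) false).Pairwise (· ≤ ·) := by
    have := PySem.List.sorted_pairwise (xs := eis) (key := fun x => x)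
    simpa using this
  intro i j hij hj hlt
  unfold pvSortClamp at *
  set s := PySem.List.sorted eis (fun x => x) false with hs
  -- helper: a pairwise-≤ list has monotone entries
  have mono : ∀ (l : List Int), l.Pairwise (· ≤ ·) → ∀ i j : Nat, i ≤ j → j < l.length →
      l.getD i 0 ≤ l.getD j 0 := by
    intro l hl i j hij hj
    rcases Nat.eq_or_lt_of_le hij with rfl | hlt'
    · exact le_refl _
    · have hi : i < l.length := lt_trans hlt' hj
      rw [List.getD_eq_getElem l 0 hi, List.getD_eq_getElem l 0 hj]
      exact (List.pairwise_iff_getElem.mp hl) i j hi hj hlt'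
  cases hget : PySem.List.pyGet? s (-1) with
  | none =>
    simp only [hget] at hj hlt ⊢
    exact lt_of_le_of_lt (mono s hpw i j hij hj) hlt
  | some last =>
    simp only [hget] at hj hlt ⊢
    by_cases hcl : last > lngth
    · simp only [if_pos hcl] at hj hlt ⊢
      have hdw : s.dropLast.Pairwise (· ≤ ·) := List.Pairwise.sublist (List.dropLast_sublist s) hpw
      have hlen : (s.dropLast ++ [lngth]).length = s.dropLast.length + 1 := by simp
      rcases Nat.lt_or_ge j s.dropLast.length with hjlt | hjge
      · have hilt : i < s.dropLast.length := lt_of_le_of_lt hij hjlt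
        rw [List.getD_append _ _ _ _ hjlt] at hlt
        rw [List.getD_append _ _ _ _ hilt]
        exact lt_of_le_of_lt (mono _ hdw i j hij hjlt) hlt
      · -- j is the clamped last entry, whose value is lngth ≥ t + 1 - 1... contradiction with hlt
        have hje : j = s.dropLast.length := by omega
        subst hje
        have : (s.dropLast ++ [lngth]).getD s.dropLast.length 0 = lngth := by
          rw [List.getD_eq_getElem _ 0 (by simp)]
          simp
        rw [this] at hlt
        -- hlt : lngth < t contradicts ht : t ≤ lngth
        omega
    · simp only [if_neg hcl] at hj hlt ⊢
      exact lt_of_le_of_lt (mono s hpw i j hij hj) hlt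

-- the binary search returns a cutoff index: everything before it satisfies the
-- predicate, and (if in range) the entry at it does not
lemma pvBsearch_spec (s : List Int) (t : Int)
    (H : ∀ i j : Nat, i ≤ j → j < s.length → s.getD j 0 < t → s.getD i 0 < t) :
    ∀ n lo hi, hi - lo ≤ n → lo ≤ hi → hi ≤ s.length →
      (∀ i, i < lo → s.getD i 0 < t) →
      (∀ i, hi ≤ i → i < s.length → ¬ s.getD i 0 < t) →
      (∀ i, i < pvBsearch s t n lo hi → s.getD i 0 < t) ∧
      pvBsearch s t n lo hi ≤ s.length ∧
      (pvBsearch s t n lo hi < s.length → ¬ s.getD (pvBsearch s t n lo hi) 0 < t) := by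
  intro n
  induction n with
  | zero =>
    intro lo hi hn hle hhi hlo hup
    have : lo = hi := by omega
    subst this
    simp only [pvBsearch]
    exact ⟨hlo, le_trans hle hhi, fun h => hup lo (le_refl _) h⟩
  | succ n ih =>
    intro lo hi hn hle hhi hlo hup
    simp only [pvBsearch]
    by_cases h : lo < hi
    · simp only [h, if_true]
      set mid := (lo + hi) / 2 with hm
      have hmid1 : lo ≤ mid := by omega
      have hmid2 : mid < hi := by omega
      by_cases hc : s.getD mid 0 < t
      · simp only [hc, if_true]
        refine ih (mid + 1) hi (by omega) (by omega) hhi ?_ hup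
        intro i hi'
        exact H i mid (by omega) (by omega) hc
      · simp only [hc, if_false]
        refine ih lo mid (by omega) (by omega) (by omega) hlo ?_
        intro i hmi hilen hcontra
        exact hc (H mid i hmi hilen hcontra)
    · simp only [h, if_false]
      have : lo = hi := by omega
      subst this
      exact ⟨hlo, le_trans hle hhi, fun h' => hup lo (le_refl _) h'⟩

-- a cutoff index characterises the takeWhile length
lemma takeWhile_length_eq (p : Int → Bool) (s : List Int) :
    ∀ k : Nat, (∀ i, i < k → p (s.getD i 0) = true) → k ≤ s.length →
      (k < s.length → ¬ p (s.getD k 0) = true) →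
      (s.takeWhile p).length = k := by
  induction s with
  | nil => intro k _ hk _; simp at hk ⊢; omega
  | cons a rest ih =>
    intro k h1 hk h3
    cases k with
    | zero =>
      have : ¬ p a = true := by
        have := h3 (by simp)
        simpa using this
      simp [this]
    | succ k' =>
      have hpa : p a = true := by simpa using h1 0 (by omega)
      rw [List.takeWhile_cons, if_pos hpa]
      simp only [List.length_cons]
      congr 1
      refine ih k' (fun i hi => ?_) (by simpa using hk) (fun hlt => ?_)
      · simpa using h1 (i + 1) (by omega)
      · have := h3 (by simp; omega)
        simpa using this
    
-- ===== VERDICT (by name: the statement is the Claim_ definition above) =====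
theorem get_sis_from_eis_spec : Claim_equal_get_sis_from_eis := by
  intro eis lngth _hdom _hpre
  unfold Spec_get_sis_from_eis get_sis_from_eis get_sis_from_eis_alt
  set s := pvSortClamp eis lngth with hs
  set p : Int → Bool := fun e => decide (e < lngth - 1) with hp
  have H := pvSortClamp_mono eis lngth (lngth - 1) (by omega)
  rw [← hs] at H
  obtain ⟨h1, h2, h3⟩ := pvBsearch_spec s (lngth - 1) H s.length 0 s.length
    (by omega) (by omega) (le_refl _) (by intro i hi; omega) (by intro i h h'; omega)
  set k := pvBsearch s (lngth - 1) s.length 0 s.length with hk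
  have htw : (s.takeWhile p).length = k := by
    refine takeWhile_length_eq p s k (fun i hi => ?_) h2 (fun hlt => ?_)
    · simpa [hp] using h1 i hi
    · have := h3 hlt
      simpa [hp] using this
  have htake : s.take k = s.takeWhile p := by
    have hpre : s.takeWhile p <+: s := List.takeWhile_prefix p
    have := List.prefix_iff_eq_take.mp hpre
    rw [htw] at this
    exact this.symm
  rw [pvLoopA_eq]
  have hsame : s.takeWhile (fun e => decide (e + 1 < lngth)) = s.takeWhile p := by
    congr 1
    funext e
    simp only [hp, decide_eq_decide]
    omega
  rw [hsame, PySem.List.slice_to_natCast, htake]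
  simp
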